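-- pv_equiv track=rewrite | github.com/jtratt07-cpu/Dashboard | app (3).py | _fuzzy
-- ===== SOURCE A (Python) =====
-- def _fuzzy(name, db, fallback={}):
--     nl = name.lower()
--     for k,v in db.items():
--         if k.lower() in nl or nl in k.lower(): return k,v
--     best_k,best_v,best_n = name,fallback,0
--     for k,v in db.items():
--         n = len(set(nl.split()) & set(k.lower().split()))
--         if n > best_n: best_n,best_k,best_v = n,k,v
--     return best_k, best_v
-- ===== SOURCE B (Python) =====
-- def _fuzzy(name, db, fallback={}):
--     nl = name.lower()
--     name_tokens = set(nl.split())
--     best_n, best_k, best_v = 0, name, fallback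
--     for k, v in db.items():
--         kl = k.lower()
--         if kl in nl or nl in kl:
--             return k, v
--         n = len(name_tokens & set(kl.split()))
--         if n > best_n:
--             best_n, best_k, best_v = n, k, v
--     return best_k, best_v
-- ===== Notes on version B (the rewrite author's own statement) =====
-- stated objective: simpler
-- what changed: Fuses A's two full passes over db into one loop that returns immediately on a substring match and otherwise maintains the best token-overlap triple, hoisting set(nl.split()) out of the loop.
import Mathlib
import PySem

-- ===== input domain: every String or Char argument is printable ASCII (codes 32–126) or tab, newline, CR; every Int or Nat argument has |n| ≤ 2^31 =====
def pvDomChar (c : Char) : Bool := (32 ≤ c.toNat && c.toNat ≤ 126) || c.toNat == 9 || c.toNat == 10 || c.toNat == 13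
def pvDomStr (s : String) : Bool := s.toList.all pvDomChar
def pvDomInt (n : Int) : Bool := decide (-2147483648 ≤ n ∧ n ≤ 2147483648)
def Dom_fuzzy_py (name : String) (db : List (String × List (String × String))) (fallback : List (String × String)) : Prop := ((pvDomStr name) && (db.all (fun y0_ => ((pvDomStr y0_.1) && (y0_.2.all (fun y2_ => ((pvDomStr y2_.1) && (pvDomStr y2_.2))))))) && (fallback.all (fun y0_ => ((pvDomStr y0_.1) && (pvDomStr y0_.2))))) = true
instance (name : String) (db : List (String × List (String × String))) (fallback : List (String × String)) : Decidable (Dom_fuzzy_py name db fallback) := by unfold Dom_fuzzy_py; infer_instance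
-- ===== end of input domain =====

-- B fuses A's two passes over db into a single loop (early return on substring
-- match, otherwise keep the best token-overlap triple); return value equivalence.

-- ===== PORT A =====
-- first loop of A: return the first (k, v) whose lowered key matches nl as substring either way
def fuzzyMatch1 (nl : String) : List (String × List (String × String)) → Option (String × List (String × String))
  | [] => none
  | (k, v) :: rest =>
    if PySem.Str.isIn (PySem.Str.lower k) nl || PySem.Str.isIn nl (PySem.Str.lower k) then some (k, v)
    else fuzzyMatch1 nl rest

def fuzzy_py (name : String) (db : List (String × List (String × String))) (fallback : List (String × String)) : String × (List (String × String)) :=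
  let nl := PySem.Str.lower name
  match fuzzyMatch1 nl db with
  | some kv => kv
  | none =>
    -- second loop of A over state (best_k, best_v, best_n)
    let r := db.foldl (fun st kv =>
      let n := PySem.Set.len (PySem.Set.inter (PySem.Set.ofList (PySem.Str.split₀ nl)) (PySem.Set.ofList (PySem.Str.split₀ (PySem.Str.lower kv.1))))
      if st.2.2 < n then (kv.1, kv.2, n) else st) (name, fallback, (0 : Int))
    (r.1, r.2.1)

-- ===== PORT B =====
-- B's single loop over db with state (best_n, best_k, best_v); early return on substring match
def fuzzyGo (nl : String) (ntoks : PySem.Set String) :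
    List (String × List (String × String)) → Int × String × List (String × String) → String × (List (String × String))
  | [], st => (st.2.1, st.2.2)
  | (k, v) :: rest, st =>
    let kl := PySem.Str.lower k
    if PySem.Str.isIn kl nl || PySem.Str.isIn nl kl then (k, v)
    else
      let n := PySem.Set.len (PySem.Set.inter ntoks (PySem.Set.ofList (PySem.Str.split₀ kl)))
      if st.1 < n then fuzzyGo nl ntoks rest (n, k, v) else fuzzyGo nl ntoks rest st

def fuzzy_py_alt (name : String) (db : List (String × List (String × String))) (fallback : List (String × String)) : String × (List (String × String)) :=
  let nl := PySem.Str.lower name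
  let ntoks := PySem.Set.ofList (PySem.Str.split₀ nl)
  fuzzyGo nl ntoks db ((0 : Int), name, fallback)

-- ===== PRECONDITION & SPEC =====
def Spec_fuzzy_py (name : String) (db : List (String × List (String × String))) (fallback : List (String × String)) (out : String × (List (String × String))) : Prop := out = fuzzy_py_alt name db fallback
instance (name : String) (db : List (String × List (String × String))) (fallback : List (String × String)) (out : String × (List (String × String))) : Decidable (Spec_fuzzy_py name db fallback out) := by unfold Spec_fuzzy_py; infer_instance

-- ===== CLAIM (what is proved, stated in full; the proofs are below) =====
def Claim_equal_fuzzy_py : Prop := ∀ (name : String) (db : List (String × List (String × String))) (fallback : List (String × String)), Dom_fuzzy_py name db fallback → Spec_fuzzy_py name db fallback (fuzzy_py name db fallback)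

-- ===== LEMMAS AND PROOFS =====
-- B's fused loop equals: first substring match if any, else A's fold from the corresponding state
theorem fuzzyGo_eq (nl : String) (db : List (String × List (String × String)))
    (st : Int × String × List (String × String)) :
    fuzzyGo nl (PySem.Set.ofList (PySem.Str.split₀ nl)) db st =
      match fuzzyMatch1 nl db with
      | some kv => kv
      | none =>
        let r := db.foldl (fun st kv =>
          let n := PySem.Set.len (PySem.Set.inter (PySem.Set.ofList (PySem.Str.split₀ nl)) (PySem.Set.ofList (PySem.Str.split₀ (PySem.Str.lower kv.1))))
          if st.2.2 < n then (kv.1, kv.2, n) else st) (st.2.1, st.2.2, st.1)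
        (r.1, r.2.1) := by
  induction db generalizing st with
  | nil => simp [fuzzyGo, fuzzyMatch1]
  | cons hd tl ih =>
    obtain ⟨k, v⟩ := hd
    simp only [fuzzyGo, fuzzyMatch1, List.foldl_cons]
    by_cases h1 : (PySem.Str.isIn (PySem.Str.lower k) nl || PySem.Str.isIn nl (PySem.Str.lower k)) = true
    · simp only [h1, if_true]
    · rw [Bool.not_eq_true] at h1
      simp only [h1, Bool.false_eq_true, if_false]
      by_cases h2 : st.1 < PySem.Set.len (PySem.Set.inter (PySem.Set.ofList (PySem.Str.split₀ nl)) (PySem.Set.ofList (PySem.Str.split₀ (PySem.Str.lower k))))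
      · rw [if_pos h2, ih]
        simp only [PySem.Set.len] at h2
        simp [h2]
      · rw [if_neg h2, ih]
        simp only [PySem.Set.len] at h2
        simp [h2]

theorem fuzzy_py_spec : Claim_equal_fuzzy_py := by
  intro name db fallback _
  show fuzzy_py name db fallback = fuzzy_py_alt name db fallback
  unfold fuzzy_py fuzzy_py_alt
  rw [fuzzyGo_eq]
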